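-- pv_equiv track=rewrite | github.com/jkeresman01/jvi | doc/scripts/jvi/vimh/vimh_gen.py | fix_line_ending
-- ===== SOURCE A (Python) =====
-- def fix_line_ending(s, end):
--     l = s.split('\n')
--     started = False
--     for i in reversed(range(len(l))):
--         if len(l[i]) > 0:
--             started = True
--         if started:
--             l[i] += end
--     return '\n'.join(l)
-- ===== SOURCE B (Python) =====
-- def fix_line_ending(s, end):
--     # strip the trailing run of newlines by index
--     n = len(s)
--     while n > 0 and s[n - 1] == '\n':
--         n -= 1
--     if n == 0:
--         return s
--     # stream the core once, inserting `end` before every '\n' and once at the end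
--     out = []
--     for c in s[:n]:
--         if c == '\n':
--             out.append(end)
--         out.append(c)
--     out.append(end)
--     out.append('\n' * (len(s) - n))
--     return ''.join(out)
-- ===== Notes on version B (the rewrite author's own statement) =====
-- stated objective: alternative
-- what changed: B never splits the string into a list of lines: it locates the trailing newline run by index, then streams the remaining characters once, emitting end before every ' ' and once at the end, instead of A's split / reverse flag-gated per-line loop / join.
import Mathlib
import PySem

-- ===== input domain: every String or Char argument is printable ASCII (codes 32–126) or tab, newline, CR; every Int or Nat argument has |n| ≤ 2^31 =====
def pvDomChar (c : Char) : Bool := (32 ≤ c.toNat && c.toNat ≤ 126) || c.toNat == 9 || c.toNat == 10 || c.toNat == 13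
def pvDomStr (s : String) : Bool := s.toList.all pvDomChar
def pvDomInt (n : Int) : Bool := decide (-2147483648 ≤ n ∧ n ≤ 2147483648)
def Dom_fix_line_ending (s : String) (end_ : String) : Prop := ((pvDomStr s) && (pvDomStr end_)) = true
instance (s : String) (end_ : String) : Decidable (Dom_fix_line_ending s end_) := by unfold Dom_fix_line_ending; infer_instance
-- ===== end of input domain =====

-- B never splits into lines: it strips the trailing newline run by index, then streams the
-- remaining characters once, inserting end_ before every '\n' and once at the end; same cost.

-- ===== PORT A =====
-- the reversed-index for loop threading `started` from the last line down is this foldr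
-- (right-to-left over the split lines); `len(l[i]) > 0` is `0 < PySem.Str.len x`
def fixStepA (end_ : String) (x : String) (acc : List String × Bool) : List String × Bool :=
  let started := acc.2 || decide (0 < PySem.Str.len x)
  ((if started then x ++ end_ else x) :: acc.1, started)

def fix_line_ending (s : String) (end_ : String) : String :=
  let l := (PySem.Str.split? s "\n").getD []  -- sep ≠ "" so split? is always some
  PySem.Str.join "\n" (l.foldr (fixStepA end_) ([], false)).1

-- ===== PORT B =====
-- Source B's `while n > 0 and s[n-1] == '\n': n -= 1` as recursion on n;
-- getD is exact: the loop only reads s[n-1] for 0 < n ≤ len(s)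
def coreLen (cs : List Char) : Nat → Nat
  | 0 => 0
  | n + 1 => if cs.getD n ' ' == '\n' then coreLen cs n else n + 1

def fix_line_ending_alt (s : String) (end_ : String) : String :=
  let n := coreLen s.toList s.toList.length
  if n = 0 then s
  else
    -- the for loop over s[:n] appending `end` before each '\n' and then each char, then the tail
    String.ofList
      ((s.toList.take n).flatMap (fun c => if c == '\n' then end_.toList ++ [c] else [c])
        ++ end_.toList ++ List.replicate (s.toList.length - n) '\n')

-- ===== PRECONDITION & SPEC =====
def Spec_fix_line_ending (s : String) (end_ : String) (out : String) : Prop := out = fix_line_ending_alt s end_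
instance (s : String) (end_ : String) (out : String) : Decidable (Spec_fix_line_ending s end_ out) := by unfold Spec_fix_line_ending; infer_instance

-- ===== CLAIM (what is proved, stated in full; the proofs are below) =====
def Claim_equal_fix_line_ending : Prop := ∀ (s : String) (end_ : String), Dom_fix_line_ending s end_ → Spec_fix_line_ending s end_ (fix_line_ending s end_)

-- ===== LEMMAS AND PROOFS =====

-- recursive (front) characterisation of Python's split on the single-char separator '\n'
def mySplit : List Char → List (List Char)
  | [] => [[]]
  | c :: cs => if c = '\n' then [] :: mySplit cs else (c :: (mySplit cs).headI) :: (mySplit cs).tail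

lemma mySplit_ne_nil (cs : List Char) : mySplit cs ≠ [] := by
  cases cs with
  | nil => simp [mySplit]
  | cons c cs => unfold mySplit; split <;> simp

lemma mySplit_eq_cons (cs : List Char) : mySplit cs = (mySplit cs).headI :: (mySplit cs).tail := by
  cases h : mySplit cs with
  | nil => exact absurd h (mySplit_ne_nil cs)
  | cons a t => simp

lemma splitOn_go_spec (fuel : Nat) : ∀ (l cur acc : _), l.length ≤ fuel →
    PySem.Chars.splitOn.go ['\n'] fuel l cur acc
      = acc.reverse ++ (cur.reverse ++ (mySplit l).headI) :: (mySplit l).tail := by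
  induction fuel with
  | zero =>
    intro l cur acc h
    have : l = [] := List.eq_nil_of_length_eq_zero (Nat.le_zero.mp h)
    subst this
    simp [PySem.Chars.splitOn.go, mySplit]
  | succ fuel ih =>
    intro l cur acc h
    cases l with
    | nil => simp [PySem.Chars.splitOn.go, mySplit]
    | cons c rest =>
      by_cases hc : c = '\n'
      · subst hc
        rw [show PySem.Chars.splitOn.go ['\n'] (fuel+1) ('\n'::rest) cur acc
              = PySem.Chars.splitOn.go ['\n'] fuel rest [] (cur.reverse :: acc) from by
            simp [PySem.Chars.splitOn.go, List.isPrefixOf]]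
        rw [ih rest [] _ (by simpa using Nat.lt_succ_iff.mp (by simpa using h))]
        simp [mySplit, ← mySplit_eq_cons]
      · have hc' : ¬ '\n' = c := fun h' => hc h'.symm
        rw [show PySem.Chars.splitOn.go ['\n'] (fuel+1) (c::rest) cur acc
              = PySem.Chars.splitOn.go ['\n'] fuel rest (c :: cur) acc from by
            simp [PySem.Chars.splitOn.go, List.isPrefixOf, hc']]
        rw [ih rest _ _ (by simpa using Nat.lt_succ_iff.mp (by simpa using h))]
        simp [mySplit, hc]

lemma splitOn_eq_mySplit (cs : List Char) :
    PySem.Chars.splitOn cs ['\n'] = mySplit cs := by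
  unfold PySem.Chars.splitOn
  rw [splitOn_go_spec (cs.length + 1) cs [] [] (Nat.le_succ _)]
  simp [← mySplit_eq_cons]

lemma split?_str (s : String) :
    PySem.Str.split? s "\n" = some ((mySplit s.toList).map String.ofList) := by
  simp [PySem.Str.split?, PySem.Chars.split?, show ("\n" : String).toList = ['\n'] from rfl,
    splitOn_eq_mySplit]

-- A's per-line step transported to lists of chars
def stepC (e : List Char) (x : List Char) (acc : List (List Char) × Bool) : List (List Char) × Bool :=
  let started := acc.2 || !x.isEmpty
  ((if started then x ++ e else x) :: acc.1, started)

lemma strlen_ofList (x : List Char) : decide (0 < PySem.Str.len (String.ofList x)) = !x.isEmpty := by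
  cases x <;> simp [PySem.Str.len]

lemma foldr_map_ofList (e : String) (L : List (List Char)) (b : Bool) :
    (L.map String.ofList).foldr (fixStepA e) ([], b)
      = (((L.foldr (stepC e.toList) ([], b)).1).map String.ofList,
         (L.foldr (stepC e.toList) ([], b)).2) := by
  induction L with
  | nil => simp
  | cons x xs ih =>
    simp only [List.map_cons, List.foldr_cons, ih, fixStepA, stepC, strlen_ofList]
    split <;> simp_all

lemma join_str (L : List (List Char)) :
    PySem.Str.join "\n" (L.map String.ofList) = String.ofList (PySem.Chars.join ['\n'] L) := by
  simp [PySem.Str.join, show ("\n" : String).toList = ['\n'] from rfl,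
    List.map_map, Function.comp_def]

def allNl (cs : List Char) : Bool := cs.all (· == '\n')

-- A's whole computation and B's whole computation, over char lists
def Gv (e : List Char) (cs : List Char) : List Char :=
  PySem.Chars.join ['\n'] ((mySplit cs).foldr (stepC e) ([], false)).1

def Bv (e : List Char) (cs : List Char) : List Char :=
  if coreLen cs cs.length = 0 then cs
  else (cs.take (coreLen cs cs.length)).flatMap (fun c => if c == '\n' then e ++ [c] else [c])
        ++ e ++ List.replicate (cs.length - coreLen cs cs.length) '\n'

-- coreLen facts
lemma coreLen_le (cs : List Char) (k : Nat) : coreLen cs k ≤ k := by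
  induction k with
  | zero => exact Nat.le_refl 0
  | succ k ih => unfold coreLen; split
                 · exact Nat.le_succ_of_le ih
                 · exact Nat.le_refl _

lemma coreLen_cons (c : Char) (cs : List Char) (k : Nat) :
    coreLen (c :: cs) (k + 1)
      = if coreLen cs k = 0 then (if c == '\n' then 0 else 1) else coreLen cs k + 1 := by
  induction k with
  | zero => simp [coreLen]
  | succ k ih =>
    rw [show coreLen (c :: cs) (k + 1 + 1)
          = if cs.getD k ' ' == '\n' then coreLen (c :: cs) (k + 1) else k + 1 + 1 from rfl]
    rw [show coreLen cs (k + 1) = if cs.getD k ' ' == '\n' then coreLen cs k else k + 1 from rfl]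
    split
    · exact ih
    · simp

lemma allNl_cons (c : Char) (cs : List Char) : allNl (c :: cs) = ((c == '\n') && allNl cs) := by
  simp [allNl]

lemma coreLen_eq_zero_iff (cs : List Char) : coreLen cs cs.length = 0 ↔ allNl cs = true := by
  induction cs with
  | nil => simp [coreLen, allNl]
  | cons c cs ih =>
    rw [show (c :: cs).length = cs.length + 1 from rfl, coreLen_cons, allNl_cons]
    by_cases h : coreLen cs cs.length = 0
    · rw [if_pos h]
      have h2 := ih.mp h
      by_cases hc : c = '\n'
      · subst hc
        simp [h2]
      · simp [hc]
    · rw [if_neg h]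
      have hnl : allNl cs = false := by
        cases hx : allNl cs
        · rfl
        · exact absurd (ih.mpr hx) h
      simp [hnl]

lemma allNl_eq_replicate (cs : List Char) (h : allNl cs = true) :
    cs = List.replicate cs.length '\n' := by
  induction cs with
  | nil => rfl
  | cons c cs ih =>
    rw [allNl_cons] at h
    simp only [Bool.and_eq_true, beq_iff_eq] at h
    rw [show (c :: cs).length = cs.length + 1 from rfl, List.replicate_succ, h.1]
    exact congrArg (List.cons '\n') (ih h.2)

-- Bv's three-case front recursion
lemma Bv_cons (e : List Char) (c : Char) (cs : List Char) :
    Bv e (c :: cs)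
      = if allNl (c :: cs) then c :: cs
        else if allNl cs then c :: (e ++ cs)
        else (if c == '\n' then e ++ [c] else [c]) ++ Bv e cs := by
  rw [Bv]
  simp only [List.length_cons, coreLen_cons]
  by_cases h0 : coreLen cs cs.length = 0
  · have hnl : allNl cs = true := (coreLen_eq_zero_iff cs).mp h0
    by_cases hc : c = '\n'
    · subst hc
      have hall : allNl ('\n' :: cs) = true := by rw [allNl_cons]; simp [hnl]
      simp [h0, hall]
    · have hna : allNl (c :: cs) = false := by rw [allNl_cons]; simp [hc]
      have hrep := allNl_eq_replicate cs hnl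
      rw [if_pos h0]
      simp only [hna, Bool.false_eq_true, if_false, hnl, if_true]
      have hcb : (c == '\n') = false := by simp [hc]
      simp [hcb, hc]
      exact hrep.symm
  · have hnl : allNl cs = false := by
      cases h : allNl cs
      · rfl
      · exact absurd ((coreLen_eq_zero_iff cs).mpr h) h0
    have hna : allNl (c :: cs) = false := by
      rw [allNl_cons, hnl]
      simp
    have hle := coreLen_le cs cs.length
    rw [if_neg h0, Bv, if_neg h0]
    simp only [hna, Bool.false_eq_true, if_false, hnl]
    rw [show cs.length + 1 - (coreLen cs cs.length + 1) = cs.length - coreLen cs cs.length by omega]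
    rw [List.take_succ_cons, List.flatMap_cons]
    simp

-- join over a cons whose head gains a front char
lemma join_cons_head (sep : List Char) (c : Char) (x : List Char) (L : List (List Char)) :
    PySem.Chars.join sep ((c :: x) :: L) = c :: PySem.Chars.join sep (x :: L) := by
  cases L with
  | nil => simp [PySem.Chars.join_singleton]
  | cons y ys => simp [PySem.Chars.join_cons_cons]

lemma join_cons_replicate_nil (x : List Char) (m : Nat) :
    PySem.Chars.join ['\n'] (x :: List.replicate m []) = x ++ List.replicate m '\n' := by
  induction m generalizing x with
  | zero => simp [PySem.Chars.join_singleton]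
  | succ m ih =>
    rw [List.replicate_succ, PySem.Chars.join_cons_cons, ih []]
    simp [List.replicate_succ]

lemma mySplit_replicate (m : Nat) :
    mySplit (List.replicate m '\n') = List.replicate (m + 1) [] := by
  induction m with
  | zero => rfl
  | succ m ih => rw [List.replicate_succ, show List.replicate (m+1+1) ([] : List Char) = [] :: List.replicate (m+1) [] from rfl, ← ih]; simp [mySplit]

lemma foldr_replicate_nil (e : List Char) (k : Nat) :
    (List.replicate k ([] : List Char)).foldr (stepC e) ([], false) = (List.replicate k [], false) := by
  induction k with
  | zero => rfl
  | succ k ih => simp [List.replicate_succ, ih, stepC]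

lemma Gv_allNl (e cs : List Char) (h : allNl cs = true) : Gv e cs = cs := by
  rw [allNl_eq_replicate cs h]
  rw [Gv, mySplit_replicate, show List.replicate (cs.length + 1) ([] : List Char) = [] :: List.replicate cs.length [] from rfl,
    show ([] :: List.replicate cs.length ([] : List Char)).foldr (stepC e) ([], false)
      = stepC e [] ((List.replicate cs.length ([] : List Char)).foldr (stepC e) ([], false)) from rfl,
    foldr_replicate_nil]
  simp [stepC, join_cons_replicate_nil]

lemma flag_true (e cs : List Char) (h : allNl cs = false) :
    ((mySplit cs).foldr (stepC e) ([], false)).2 = true := by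
  induction cs with
  | nil => simp [allNl] at h
  | cons c cs ih =>
    rw [allNl_cons] at h
    by_cases hc : c = '\n'
    · subst hc
      simp only [beq_self_eq_true, Bool.true_and] at h
      rw [show mySplit ('\n' :: cs) = [] :: mySplit cs from by simp [mySplit]]
      simp [stepC, ih h]
    · rw [show mySplit (c :: cs) = (c :: (mySplit cs).headI) :: (mySplit cs).tail from by simp [mySplit, hc]]
      simp [stepC]

lemma G_eq_B (e cs : List Char) : Gv e cs = Bv e cs := by
  induction cs with
  | nil => simp [Gv, Bv, mySplit, stepC, coreLen, PySem.Chars.join_singleton]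
  | cons c cs ih =>
    rw [Bv_cons]
    by_cases hall : allNl (c :: cs) = true
    · rw [if_pos hall]
      exact Gv_allNl e _ hall
    · rw [if_neg hall]
      by_cases hnl : allNl cs = true
      · rw [if_pos hnl]
        have hc : c ≠ '\n' := by
          intro hc
          rw [allNl_cons, hc] at hall
          simp [hnl] at hall
        have hrep := allNl_eq_replicate cs hnl
        rw [Gv, show mySplit (c :: cs) = (c :: (mySplit cs).headI) :: (mySplit cs).tail from by
              simp [mySplit, hc]]
        have h2 := mySplit_replicate cs.length
        rw [← hrep] at h2
        rw [h2]
        simp only [List.headI, List.tail, show List.replicate (cs.length + 1) ([] : List Char) = [] :: List.replicate cs.length [] from rfl]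
        rw [show ((c :: ([] : List Char)) :: List.replicate cs.length ([] : List Char)).foldr (stepC e) ([], false)
              = stepC e [c] ((List.replicate cs.length ([] : List Char)).foldr (stepC e) ([], false)) from rfl,
          foldr_replicate_nil]
        simp only [stepC, List.isEmpty_cons, Bool.not_false, Bool.or_true, if_true]
        rw [join_cons_replicate_nil]
        rw [← hrep]
        simp
      · rw [if_neg hnl, ← ih]
        have hnlb : allNl cs = false := by simpa using hnl
        by_cases hc : c = '\n'
        · subst hc
          simp only [beq_self_eq_true, if_true]
          rw [Gv, show mySplit ('\n' :: cs) = [] :: mySplit cs from by simp [mySplit]]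
          rw [show (([] : List Char) :: mySplit cs).foldr (stepC e) ([], false)
                = stepC e [] ((mySplit cs).foldr (stepC e) ([], false)) from rfl]
          simp only [stepC, List.isEmpty_nil, Bool.not_true, Bool.or_false, flag_true e cs hnlb, if_true, List.nil_append]
          -- the folded list is a cons: expose it
          rw [mySplit_eq_cons cs, show ((mySplit cs).headI :: (mySplit cs).tail).foldr (stepC e) ([], false)
                = stepC e (mySplit cs).headI (((mySplit cs).tail).foldr (stepC e) ([], false)) from rfl]
          rw [stepC, PySem.Chars.join_cons_cons]
          rw [Gv, mySplit_eq_cons cs, show ((mySplit cs).headI :: (mySplit cs).tail).foldr (stepC e) ([], false)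
                = stepC e (mySplit cs).headI (((mySplit cs).tail).foldr (stepC e) ([], false)) from rfl,
            stepC]
          simp
        · have hcb : (c == '\n') = false := by simp [hc]
          rw [hcb]
          simp only [Bool.false_eq_true, if_false]
          rw [Gv, show mySplit (c :: cs) = (c :: (mySplit cs).headI) :: (mySplit cs).tail from by
                simp [mySplit, hc]]
          rw [show ((c :: (mySplit cs).headI) :: (mySplit cs).tail).foldr (stepC e) ([], false)
                = stepC e (c :: (mySplit cs).headI) (((mySplit cs).tail).foldr (stepC e) ([], false)) from rfl]
          simp only [stepC, List.isEmpty_cons, Bool.not_false, Bool.or_true, if_true, List.cons_append]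
          rw [join_cons_head]
          rw [Gv, mySplit_eq_cons cs, show ((mySplit cs).headI :: (mySplit cs).tail).foldr (stepC e) ([], false)
                = stepC e (mySplit cs).headI (((mySplit cs).tail).foldr (stepC e) ([], false)) from rfl,
            stepC]
          have hflag : ((mySplit cs).foldr (stepC e) ([], false)).2 = true := flag_true e cs hnlb
          rw [mySplit_eq_cons cs, show ((mySplit cs).headI :: (mySplit cs).tail).foldr (stepC e) ([], false)
                = stepC e (mySplit cs).headI (((mySplit cs).tail).foldr (stepC e) ([], false)) from rfl, stepC] at hflag
          simp only at hflag
          simp [hflag]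

lemma alt_eq_Bv (s end_ : String) :
    fix_line_ending_alt s end_ = String.ofList (Bv end_.toList s.toList) := by
  rw [fix_line_ending_alt, Bv]
  by_cases h : coreLen s.toList s.toList.length = 0
  · have h' := h
    simp only [String.length_toList] at h'
    simp [h']
  · have h' := h
    simp only [String.length_toList] at h'
    simp [h']

-- ===== VERDICT (by name: the statement is the Claim_ definition above) =====
theorem fix_line_ending_spec : Claim_equal_fix_line_ending := by
  intro s e _
  show _ = _
  rw [fix_line_ending, alt_eq_Bv]
  rw [split?_str, Option.getD_some, foldr_map_ofList, join_str, ← Gv, G_eq_B]
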